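-- pv_equiv track=rewrite | github.com/lkgv/PythonStAn | benchmark/generators.py | pipeline_example
-- ===== SOURCE A (Python) =====
-- def pipeline_example(numbers):
--     """Example of a generator pipeline."""
--
--     def filter_even(nums):
--         for n in nums:
--             if n % 2 == 0:
--                 yield n
--
--     def multiply_by_three(nums):
--         for n in nums:
--             yield n * 3
--
--     def add_ten(nums):
--         for n in nums:
--             yield n + 10
--
--     # Create pipeline
--     even_numbers = filter_even(numbers)
--     multiplied = multiply_by_three(even_numbers)
--     result = add_ten(multiplied)
--
--     return result
-- ===== SOURCE B (Python) =====
-- def pipeline_example(numbers):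
--     """Single fused lazy pass: keep evens, map n -> n*3 + 10."""
--     def fused(nums):
--         for n in nums:
--             if n % 2 == 0:
--                 yield n * 3 + 10
--     return fused(numbers)
-- ===== Notes on version B (the rewrite author's own statement) =====
-- stated objective: simpler
-- what changed: Fuses A's three chained generator stages (filter_even, multiply_by_three, add_ten) into one generator with a single explicit loop that tests parity and yields n*3+10 directly.
import Mathlib
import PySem

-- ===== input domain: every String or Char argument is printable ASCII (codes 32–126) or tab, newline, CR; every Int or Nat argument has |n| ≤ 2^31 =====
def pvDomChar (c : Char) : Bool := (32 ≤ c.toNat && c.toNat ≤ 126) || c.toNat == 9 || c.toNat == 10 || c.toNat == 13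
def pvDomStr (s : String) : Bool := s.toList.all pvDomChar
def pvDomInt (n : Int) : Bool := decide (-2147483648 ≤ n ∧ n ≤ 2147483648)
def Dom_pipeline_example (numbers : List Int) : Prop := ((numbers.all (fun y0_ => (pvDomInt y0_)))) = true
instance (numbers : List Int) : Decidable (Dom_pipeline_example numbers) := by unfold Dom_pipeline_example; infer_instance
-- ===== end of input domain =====

-- B fuses A's three chained generator stages into one loop yielding n*3+10 for even n; objective: simpler.
-- Both programs return lazy generators in Python; the equivalence proved is about the sequence of yielded values.

-- ===== PORT A =====
-- A's three generator stages, each ported as its own structural recursion over its input stream.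
def pvFilterEven : List Int → List Int
  | [] => []
  | n :: rest => if PySem.Int.mod n 2 = 0 then n :: pvFilterEven rest else pvFilterEven rest

def pvMultiplyByThree : List Int → List Int
  | [] => []
  | n :: rest => n * 3 :: pvMultiplyByThree rest

def pvAddTen : List Int → List Int
  | [] => []
  | n :: rest => (n + 10) :: pvAddTen rest

def pipeline_example (numbers : List Int) : List Int :=
  pvAddTen (pvMultiplyByThree (pvFilterEven numbers))

-- ===== PORT B =====
-- B's single fused loop.
def pipeline_example_alt : List Int → List Int
  | [] => []
  | n :: rest =>
    if PySem.Int.mod n 2 = 0 then (n * 3 + 10) :: pipeline_example_alt rest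
    else pipeline_example_alt rest

-- ===== PRECONDITION & SPEC =====
def Spec_pipeline_example (numbers : List Int) (out : List Int) : Prop := out = pipeline_example_alt numbers
instance (numbers : List Int) (out : List Int) : Decidable (Spec_pipeline_example numbers out) := by unfold Spec_pipeline_example; infer_instance

-- ===== CLAIM (what is proved, stated in full; the proofs are below) =====
def Claim_equal_pipeline_example : Prop := ∀ (numbers : List Int), Dom_pipeline_example numbers → Spec_pipeline_example numbers (pipeline_example numbers)

-- ===== LEMMAS AND PROOFS =====
theorem pipeline_eq (numbers : List Int) :
    pvAddTen (pvMultiplyByThree (pvFilterEven numbers)) = pipeline_example_alt numbers := by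
  induction numbers with
  | nil => rfl
  | cons n rest ih =>
    rw [pvFilterEven, pipeline_example_alt]
    by_cases h : PySem.Int.mod n 2 = 0
    · rw [if_pos h, if_pos h, pvMultiplyByThree, pvAddTen, ih]
    · rw [if_neg h, if_neg h, ih]

-- ===== VERDICT (by name: the statement is the Claim_ definition above) =====
theorem pipeline_example_spec : Claim_equal_pipeline_example := by
  intro numbers _
  unfold Spec_pipeline_example pipeline_example
  exact pipeline_eq numbers
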